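-- pv_equiv track=rewrite | github.com/SebJana/clash-royale-analytics | backend/app/src/clash_royale_api.py | check_tag_syntax
-- ===== SOURCE A (Python) =====
-- def check_tag_syntax(player_tag: str):
--     """
--     Checks wether the player tag starts with a '#' and has the correct length
--
--     Args:
--         player_tag (str): The player tag starting with '#' (e.g., "#YYRJQY28")
--
--     Returns:
--         bool: True if valid, False otherwise
--     """
--
--     ALPHABET = set("0289PYLQGRJCUV")  # Supercell-Tag-Alphabet
--
--     # Strip the tag
--     tag = player_tag.strip()
--
--     # Missing the starting code symbol
--     if not tag.startswith("#"):
--         return False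
--
--     core = tag[1:]  # Part without the leading '#'
--
--     # Invalid length
--     if len(core) < 8  or len(core) > 11:
--         return False
--
--     # Check if the tag without the '#' is only numbers and upper letters
--     if not all(ch in ALPHABET for ch in core):
--         return False
--
--     # Valid if all checks passed
--     return True
-- ===== SOURCE B (Python) =====
-- import re
--
-- # Anchored pattern: leading '#', then 8-11 chars from the Supercell tag alphabet.
-- _TAG_RE = re.compile(r"#[0289PYLQGRJCUV]{8,11}")
--
-- def check_tag_syntax(player_tag: str):
--     return _TAG_RE.fullmatch(player_tag.strip()) is not None
-- ===== Notes on version B (the rewrite author's own statement) =====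
-- stated objective: idiomatic
-- what changed: Replaces the stepwise guard chain (startswith, slice, length bounds, all-in-set loop) with one anchored compiled regex fullmatch on the stripped input.
import Mathlib
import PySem

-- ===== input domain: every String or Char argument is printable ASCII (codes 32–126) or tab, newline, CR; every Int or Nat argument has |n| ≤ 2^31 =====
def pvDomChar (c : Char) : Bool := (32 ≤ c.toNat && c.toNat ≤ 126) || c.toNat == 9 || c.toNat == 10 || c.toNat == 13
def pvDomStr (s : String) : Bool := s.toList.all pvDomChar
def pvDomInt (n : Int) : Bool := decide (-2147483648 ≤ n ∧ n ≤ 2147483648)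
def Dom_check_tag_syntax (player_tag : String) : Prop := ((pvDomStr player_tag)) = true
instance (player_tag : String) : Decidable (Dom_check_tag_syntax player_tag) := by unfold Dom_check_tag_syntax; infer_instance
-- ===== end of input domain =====

-- B replaces A's stepwise guard chain with a single anchored pattern match (regex fullmatch in Python); same cost, more idiomatic.


-- ===== PORT A =====
def check_tag_syntax (player_tag : String) : Bool :=
  let ALPHABET : PySem.Set Char := PySem.Set.ofList "0289PYLQGRJCUV".toList
  let tag := PySem.Chars.strip player_tag.toList  -- tag = player_tag.strip(), as code points
  if !(PySem.Chars.startswith tag "#".toList) then false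
  else
    -- core = tag[1:] on code points
    let core := PySem.List.slice tag (some 1) none
    if core.length < 8 || core.length > 11 then false
    else if !(core.all (fun ch => PySem.Set.contains ALPHABET ch)) then false
    else true

-- ===== PORT B =====
-- hand port of the regex engine's work for fullmatch(r"#[0289PYLQGRJCUV]{8,11}", tag):
-- a '#' head, then 8..11 characters of the class; exact on all inputs.
def pvTagClass (c : Char) : Bool := "0289PYLQGRJCUV".toList.contains c

def check_tag_syntax_alt (player_tag : String) : Bool :=
  match PySem.Chars.strip player_tag.toList with
  | '#' :: rest => decide (8 ≤ rest.length ∧ rest.length ≤ 11) && rest.all pvTagClass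
  | _ => false

-- ===== PRECONDITION & SPEC =====
def Spec_check_tag_syntax (player_tag : String) (out : Bool) : Prop := out = check_tag_syntax_alt player_tag
instance (player_tag : String) (out : Bool) : Decidable (Spec_check_tag_syntax player_tag out) := by unfold Spec_check_tag_syntax; infer_instance

-- ===== CLAIM (what is proved, stated in full; the proofs are below) =====
def Claim_equal_check_tag_syntax : Prop := ∀ (player_tag : String), Dom_check_tag_syntax player_tag → Spec_check_tag_syntax player_tag (check_tag_syntax player_tag)

-- ===== LEMMAS AND PROOFS =====

-- startswith '#' is a head test
theorem pv_startswith_hash (l : List Char) :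
    PySem.Chars.startswith l "#".toList = (l.head? == some '#') := by
  have h1 : "#".toList = ['#'] := by decide
  rw [h1, Bool.eq_iff_iff, PySem.Chars.startswith_iff]
  cases l with
  | nil => decide
  | cons c rest =>
      rw [List.cons_prefix_cons]
      simp only [List.nil_prefix, and_true, beq_iff_eq, List.head?_cons, Option.some.injEq]
      exact eq_comm

-- the Supercell alphabet literal is duplicate-free, so set() keeps it as is
theorem pv_alpha_ofList :
    PySem.Set.ofList "0289PYLQGRJCUV".toList = "0289PYLQGRJCUV".toList := by
  decide

theorem check_tag_syntax_key (s : String) :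
    check_tag_syntax s = check_tag_syntax_alt s := by
  unfold check_tag_syntax check_tag_syntax_alt
  rw [pv_alpha_ofList]
  cases h : PySem.Chars.strip s.toList with
  | nil =>
      simp only [pv_startswith_hash]
      simp
  | cons c rest =>
      simp only [pv_startswith_hash, List.head?_cons]
      rcases eq_or_ne c '#' with rfl | hc
      · simp only [beq_self_eq_true, Bool.not_true, Bool.false_eq_true, if_false,
          PySem.List.slice_from_one, List.tail_cons]
        have hall : ∀ ch, PySem.Set.contains ("0289PYLQGRJCUV".toList) ch = pvTagClass ch := by
          intro ch; simp [pvTagClass]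
        by_cases hlen : 8 ≤ rest.length ∧ rest.length ≤ 11
        · rw [if_neg (by simp only [Bool.or_eq_true, decide_eq_true_eq]; omega)]
          simp only [hall, decide_eq_true hlen, Bool.true_and]
          cases rest.all pvTagClass <;> simp
        · rw [if_pos (by simp only [Bool.or_eq_true, decide_eq_true_eq]; omega)]
          simp [hlen]
      · have hne : (some c == some '#') = false := by simp [hc]
        rw [hne]
        simp only [Bool.not_false, if_true]
        split
        · next heq => exact absurd (List.cons.inj heq).1 hc
        · rfl

-- ===== VERDICT (by name: the statement is the Claim_ definition above) =====
theorem check_tag_syntax_spec : Claim_equal_check_tag_syntax := by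
  intro s _
  exact check_tag_syntax_key s
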